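-- pv_equiv track=rewrite | github.com/XS-MLVP/UCAgent | examples/Formal/scripts/formal_checkers.py | _extract_prop_code
-- ===== SOURCE A (Python) =====
-- def _extract_prop_code(prop_name: str, checker_content: str) -> str:
--     """
--     Extracts SVA code snippets of a property from checker.sv (5 lines before and after).
--     """
--     lines = checker_content.split('\n')
--     for i, line in enumerate(lines):
--         if prop_name in line and ('assert' in line or 'property' in line or ':' in line):
--             start = max(0, i - 3)
--             end = min(len(lines), i + 6)
--             return '\n'.join(lines[start:end])
--     # Fallback: only find lines where the property name appears
--     for i, line in enumerate(lines):
--         if prop_name in line: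
--             start = max(0, i - 2)
--             end = min(len(lines), i + 4)
--             return '\n'.join(lines[start:end])
--     return "(Property definition not found)"
-- ===== SOURCE B (Python) =====
-- def _extract_prop_code(prop_name: str, checker_content: str) -> str:
--     lines = checker_content.split('\n')
--     n = len(lines)
--     fallback = None
--     for i, line in enumerate(lines):
--         if prop_name in line:
--             if 'assert' in line or 'property' in line or ':' in line:
--                 return '\n'.join(lines[max(0, i - 3):min(n, i + 6)])
--             if fallback is None:
--                 fallback = i
--     if fallback is not None:
--         return '\n'.join(lines[max(0, fallback - 2):min(n, fallback + 4)])
--     return "(Property definition not found)"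
-- ===== Notes on version B (the rewrite author's own statement) =====
-- stated objective: alternative
-- what changed: Replaces A's two full scans (strict keyword pass, then a second loose pass from the start) with one pass over the enumerated lines that returns immediately on a strict match and records the first loose-match index as a fallback used after the loop.
import Mathlib
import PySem

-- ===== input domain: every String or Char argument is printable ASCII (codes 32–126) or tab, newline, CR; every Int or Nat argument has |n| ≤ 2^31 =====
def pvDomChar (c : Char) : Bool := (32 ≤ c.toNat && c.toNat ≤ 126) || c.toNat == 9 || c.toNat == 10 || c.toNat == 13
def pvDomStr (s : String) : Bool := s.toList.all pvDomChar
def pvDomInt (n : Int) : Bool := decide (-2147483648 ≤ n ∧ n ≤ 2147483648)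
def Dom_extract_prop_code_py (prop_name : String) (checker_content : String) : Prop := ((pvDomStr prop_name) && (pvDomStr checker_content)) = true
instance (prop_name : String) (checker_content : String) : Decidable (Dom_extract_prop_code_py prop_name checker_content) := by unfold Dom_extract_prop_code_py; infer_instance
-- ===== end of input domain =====

-- B replaces A's two scans with a single pass recording a fallback index; objective: alternative decomposition.

-- ===== PORT A =====
-- first loop of A: first line containing prop_name together with a keyword; returns its joined window
def pvFindStrict (prop_name : String) (lines : List String) : List (Int × String) → Option String
  | [] => none
  | (i, line) :: rest =>
    if PySem.Str.isIn prop_name line &&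
       (PySem.Str.isIn "assert" line || PySem.Str.isIn "property" line || PySem.Str.isIn ":" line) then
      some (PySem.Str.join "\n"
        (PySem.List.slice lines (some (max 0 (i - 3))) (some (min (PySem.List.len lines) (i + 6)))))
    else pvFindStrict prop_name lines rest

-- second loop of A: first line merely containing prop_name; returns its joined window
def pvFindLoose (prop_name : String) (lines : List String) : List (Int × String) → Option String
  | [] => none
  | (i, line) :: rest =>
    if PySem.Str.isIn prop_name line then
      some (PySem.Str.join "\n"
        (PySem.List.slice lines (some (max 0 (i - 2))) (some (min (PySem.List.len lines) (i + 4)))))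
    else pvFindLoose prop_name lines rest

def extract_prop_code_py (prop_name : String) (checker_content : String) : String :=
  let lines := (PySem.Str.split? checker_content "\n").getD []
  match pvFindStrict prop_name lines (PySem.List.enumerate lines 0) with
  | some s => s
  | none =>
    match pvFindLoose prop_name lines (PySem.List.enumerate lines 0) with
    | some s => s
    | none => "(Property definition not found)"

-- ===== PORT B =====
-- single pass: return on a strict match at once, remember the first loose index as fallback
def pvScanB (prop_name : String) (lines : List String) : List (Int × String) → Option Int → String
  | [], fb =>
    match fb with
    | some j => PySem.Str.join "\n"
        (PySem.List.slice lines (some (max 0 (j - 2))) (some (min (PySem.List.len lines) (j + 4))))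
    | none => "(Property definition not found)"
  | (i, line) :: rest, fb =>
    if PySem.Str.isIn prop_name line then
      if PySem.Str.isIn "assert" line || PySem.Str.isIn "property" line || PySem.Str.isIn ":" line then
        PySem.Str.join "\n"
          (PySem.List.slice lines (some (max 0 (i - 3))) (some (min (PySem.List.len lines) (i + 6))))
      else pvScanB prop_name lines rest (match fb with | none => some i | some j => some j)
    else pvScanB prop_name lines rest fb

def extract_prop_code_py_alt (prop_name : String) (checker_content : String) : String :=
  let lines := (PySem.Str.split? checker_content "\n").getD []
  pvScanB prop_name lines (PySem.List.enumerate lines 0) none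

-- ===== PRECONDITION & SPEC =====
def Spec_extract_prop_code_py (prop_name : String) (checker_content : String) (out : String) : Prop := out = extract_prop_code_py_alt prop_name checker_content
instance (prop_name : String) (checker_content : String) (out : String) : Decidable (Spec_extract_prop_code_py prop_name checker_content out) := by unfold Spec_extract_prop_code_py; infer_instance

-- ===== CLAIM (what is proved, stated in full; the proofs are below) =====
def Claim_equal_extract_prop_code_py : Prop := ∀ (prop_name : String) (checker_content : String), Dom_extract_prop_code_py prop_name checker_content → Spec_extract_prop_code_py prop_name checker_content (extract_prop_code_py prop_name checker_content)

-- ===== LEMMAS AND PROOFS =====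
lemma pvScanB_eq (prop_name : String) (lines : List String) :
    ∀ (rest : List (Int × String)) (fb : Option Int),
      pvScanB prop_name lines rest fb =
        match pvFindStrict prop_name lines rest with
        | some s => s
        | none =>
          match fb with
          | some j => PySem.Str.join "\n"
              (PySem.List.slice lines (some (max 0 (j - 2))) (some (min (PySem.List.len lines) (j + 4))))
          | none => (pvFindLoose prop_name lines rest).getD "(Property definition not found)"
  | [], fb => by cases fb <;> simp [pvScanB, pvFindStrict, pvFindLoose]
  | (i, line) :: rest, fb => by
    cases hn : PySem.Chars.isIn prop_name.toList line.toList <;>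
    cases h1 : PySem.Chars.isIn ['a','s','s','e','r','t'] line.toList <;>
    cases h2 : PySem.Chars.isIn ['p','r','o','p','e','r','t','y'] line.toList <;>
    cases h3 : PySem.Chars.isIn [':'] line.toList <;>
    cases fb <;>
    simp [pvScanB, pvFindStrict, pvFindLoose, hn, h1, h2, h3, pvScanB_eq prop_name lines rest]

-- ===== VERDICT (by name: the statement is the Claim_ definition above) =====
theorem extract_prop_code_py_spec : Claim_equal_extract_prop_code_py := by
  intro prop_name checker_content _
  unfold Spec_extract_prop_code_py
  simp only [extract_prop_code_py, extract_prop_code_py_alt]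
  rw [pvScanB_eq]
  cases hs : pvFindStrict prop_name ((PySem.Str.split? checker_content "\n").getD [])
      (PySem.List.enumerate ((PySem.Str.split? checker_content "\n").getD []) 0)
  · cases hl : pvFindLoose prop_name ((PySem.Str.split? checker_content "\n").getD [])
        (PySem.List.enumerate ((PySem.Str.split? checker_content "\n").getD []) 0) <;> simp
  · rfl
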